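-- pv_equiv track=rewrite | github.com/7cadetter/advent_24 | day9/q1.py | isContig
-- ===== SOURCE A (Python) =====
-- def isContig(memory):
--     """
--     Check if memory is conitguous with no spaces between memory
--     """
--     space = False
--     for i in memory:
--         if not space and i == '.':
--             space = True
--
--         # If the space started and you find another number, it's not contiguous
--         elif space and i != '.':
--             return False
--     return True
-- ===== SOURCE B (Python) =====
-- def isContig(memory):
--     if '.' not in memory:
--         return True
--     idx = memory.index('.')
--     return all(c == '.' for c in memory[idx:])
-- ===== Notes on version B (the rewrite author's own statement) =====
-- stated objective: simpler
-- what changed: Replaces A's stateful flag loop with a find-the-first-gap-then-check-the-tail decomposition (membership test, list.index, all over a slice).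
import Mathlib
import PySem

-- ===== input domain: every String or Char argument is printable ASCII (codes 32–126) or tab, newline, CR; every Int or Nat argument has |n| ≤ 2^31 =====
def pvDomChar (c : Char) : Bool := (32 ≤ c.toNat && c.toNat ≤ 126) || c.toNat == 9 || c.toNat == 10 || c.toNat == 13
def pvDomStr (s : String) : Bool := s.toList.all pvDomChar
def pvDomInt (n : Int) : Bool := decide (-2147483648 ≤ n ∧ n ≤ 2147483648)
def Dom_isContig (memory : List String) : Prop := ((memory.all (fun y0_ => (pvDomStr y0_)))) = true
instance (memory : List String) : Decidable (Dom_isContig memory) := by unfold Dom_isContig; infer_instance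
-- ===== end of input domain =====

-- B replaces A's stateful flag loop with find-first-gap-then-check-tail, for simplicity (no speed claim).
-- ===== PORT A =====
-- loop carrying the `space` flag; `return False` becomes the `false` branch
def isContigLoop : Bool → List String → Bool
  | _, [] => true
  | space, i :: rest =>
    if !space && i == "." then isContigLoop true rest
    else if space && i != "." then false
    else isContigLoop space rest

def isContig (memory : List String) : Bool := isContigLoop false memory

-- ===== PORT B =====
def isContig_alt (memory : List String) : Bool :=
  match PySem.List.index? memory "." with
  | none => true
  | some idx => (PySem.List.slice memory (some (idx : Int)) none).all (fun c => c == ".")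

-- ===== PRECONDITION & SPEC =====
def Spec_isContig (memory : List String) (out : Bool) : Prop := out = isContig_alt memory
instance (memory : List String) (out : Bool) : Decidable (Spec_isContig memory out) := by unfold Spec_isContig; infer_instance

-- ===== CLAIM (what is proved, stated in full; the proofs are below) =====
def Claim_equal_isContig : Prop := ∀ (memory : List String), Dom_isContig memory → Spec_isContig memory (isContig memory)

-- ===== LEMMAS AND PROOFS =====

-- ===== VERDICT (by name: the statement is the Claim_ definition above) =====
lemma loop_true_eq_all (l : List String) :
    isContigLoop true l = l.all (fun c => c == ".") := by
  induction l with
  | nil => rfl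
  | cons x rest ih =>
    by_cases hx : x = "."
    · simp [isContigLoop, hx, ih]
    · simp [isContigLoop, hx]

lemma loop_false_eq_alt (l : List String) :
    isContigLoop false l = isContig_alt l := by
  induction l with
  | nil => rfl
  | cons x rest ih =>
    by_cases hx : x = "."
    · subst hx
      rw [isContigLoop, isContig_alt, PySem.List.index?_cons_self]
      simp [loop_true_eq_all]
    · rw [isContig_alt, PySem.List.index?_cons_of_ne rest hx]
      rw [isContigLoop]
      simp only [hx, Bool.not_false, Bool.true_and, beq_iff_eq, if_false, Bool.false_and]
      rw [ih, isContig_alt]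
      cases h : PySem.List.index? rest "." with
      | none => simp
      | some k =>
        simp only [Option.map_some]
        rw [PySem.List.slice_from_natCast, PySem.List.slice_from_natCast]
        simp [List.drop_succ_cons]

theorem isContig_spec : Claim_equal_isContig := by
  intro memory _
  unfold Spec_isContig isContig
  exact loop_false_eq_alt memory
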